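-- pv_equiv track=rewrite | github.com/TheRealAniG/CS5 | hw9pr1.py | diagonalize
-- ===== SOURCE A (Python) =====
-- def createOneRow(width):
--     """Returns one row of zeros of width "width"...
--        You might use this in your createBoard(width, height) function."""
--     row = []
--     for col in range(width):
--         row += [0]
--     return row
--
-- def createBoard(width, height):
--     """Returns a 2D array with "height" rows and "width" columns."""
--     A = []
--     for row in range(height):
--         A += [createOneRow(width)]  # Use the above function so that SOMETHING is one row!
--     return A
--
-- def diagonalize(width, height):
--     """Creates an empty board and then modifies it
--        so that it has a diagonal strip of "on" cells.
--        But it does that only in the *interior* of the 2D array.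
--     """
--     A = createBoard(width, height)
--
--     for row in range(1, height - 1):
--         for col in range(1, width - 1):
--             if row == col:
--                 A[row][col] = 1
--             else:
--                 A[row][col] = 0
--
--     return A
-- ===== SOURCE B (Python) =====
-- def diagonalize(width, height):
--     """Creates an empty board and then modifies it
--        so that it has a diagonal strip of "on" cells.
--        But it does that only in the *interior* of the 2D array.
--     """
--     A = [[0] * width for _ in range(height)]
--     for i in range(1, min(width, height) - 1):
--         A[i][i] = 1
--     return A
-- ===== Notes on version B (the rewrite author's own statement) =====
-- stated objective: faster
-- what changed: B builds the all-zero board with one comprehension and marks only the diagonal cells in a single loop over range(1, min(width,height)-1), instead of A's helper-built board (element-by-element list appends) followed by a nested interior double loop testing row==col and re-writing zeros.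
import Mathlib
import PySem

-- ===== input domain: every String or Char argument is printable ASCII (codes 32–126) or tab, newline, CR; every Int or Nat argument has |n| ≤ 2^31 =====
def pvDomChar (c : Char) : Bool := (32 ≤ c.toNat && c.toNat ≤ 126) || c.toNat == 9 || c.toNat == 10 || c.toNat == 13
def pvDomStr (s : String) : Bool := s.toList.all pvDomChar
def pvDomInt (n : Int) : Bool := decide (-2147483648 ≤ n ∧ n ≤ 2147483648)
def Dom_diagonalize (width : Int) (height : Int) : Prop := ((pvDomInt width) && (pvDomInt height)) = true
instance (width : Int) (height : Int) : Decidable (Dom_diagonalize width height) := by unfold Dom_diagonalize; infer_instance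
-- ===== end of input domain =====

-- B replaces A's helper-built board and nested interior double loop (row==col test,
-- redundant zero writes) by a comprehension-built zero board plus one direct diagonal pass.

-- ===== PORT A =====
def createOneRow (width : Int) : List Int :=
  (PySem.List.pyRange 0 width 1).foldl (fun row _ => row ++ [0]) []

def createBoard (width : Int) (height : Int) : List (List Int) :=
  (PySem.List.pyRange 0 height 1).foldl (fun A _ => A ++ [createOneRow width]) []

-- 'A[row][col] = v' is ported as pySetD/pyGetD; exact here since row ∈ range(1, height-1)
-- and col ∈ range(1, width-1) are always valid indices of the freshly built board.
def diagonalize (width : Int) (height : Int) : List (List Int) :=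
  (PySem.List.pyRange 1 (height - 1) 1).foldl (fun A row =>
    (PySem.List.pyRange 1 (width - 1) 1).foldl (fun A col =>
      PySem.List.pySetD A row
        (PySem.List.pySetD (PySem.List.pyGetD A row []) col (if row == col then 1 else 0))) A)
    (createBoard width height)

-- ===== PORT B =====
def diagonalize_alt (width : Int) (height : Int) : List (List Int) :=
  (PySem.List.pyRange 1 (min width height - 1) 1).foldl (fun A i =>
      PySem.List.pySetD A i (PySem.List.pySetD (PySem.List.pyGetD A i []) i 1))
    ((List.range height.toNat).map (fun _ => List.replicate width.toNat 0))

-- ===== PRECONDITION & SPEC =====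
def Spec_diagonalize (width : Int) (height : Int) (out : List (List Int)) : Prop := out = diagonalize_alt width height
instance (width : Int) (height : Int) (out : List (List Int)) : Decidable (Spec_diagonalize width height out) := by unfold Spec_diagonalize; infer_instance

-- ===== CLAIM (what is proved, stated in full; the proofs are below) =====
def Claim_equal_diagonalize : Prop := ∀ (width : Int) (height : Int), Dom_diagonalize width height → Spec_diagonalize width height (diagonalize width height)

-- ===== LEMMAS AND PROOFS =====

-- canonical forms used by the proof
def pvRow0 (w : Nat) : List Int := List.replicate w 0
def pvRow1 (w : Nat) (i : Nat) : List Int := (List.replicate w 0).set i 1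
def pvBoard (width height m : Int) : List (List Int) :=
  (List.range height.toNat).map (fun (i : Nat) =>
    if 1 ≤ (i : Int) ∧ (i : Int) < m ∧ (i : Int) < width - 1 then pvRow1 width.toNat i
    else pvRow0 width.toNat)

theorem pv_foldl_append_zero (l : List Int) :
    ∀ acc : List Int, l.foldl (fun r (_ : Int) => r ++ [(0 : Int)]) acc = acc ++ List.replicate l.length 0 := by
  induction l with
  | nil => simp
  | cons c l ih =>
    intro acc
    rw [List.foldl_cons, ih, List.append_assoc, List.length_cons]
    simp [List.replicate_succ]

theorem createOneRow_eq (width : Int) : createOneRow width = pvRow0 width.toNat := by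
  rw [createOneRow, pv_foldl_append_zero, PySem.List.length_pyRange_one, pvRow0]
  simp

theorem pv_foldl_append_row (width : Int) (l : List Int) :
    ∀ acc : List (List Int),
      l.foldl (fun A (_ : Int) => A ++ [createOneRow width]) acc
        = acc ++ List.replicate l.length (pvRow0 width.toNat) := by
  induction l with
  | nil => simp
  | cons c l ih =>
    intro acc
    rw [List.foldl_cons, ih, List.append_assoc, List.length_cons, createOneRow_eq]
    simp [List.replicate_succ]

theorem createBoard_eq (width height : Int) :
    createBoard width height = List.replicate height.toNat (pvRow0 width.toNat) := by
  rw [createBoard, pv_foldl_append_row, PySem.List.length_pyRange_one]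
  simp

theorem pvBoard_one (width height : Int) :
    pvBoard width height 1 = List.replicate height.toNat (pvRow0 width.toNat) := by
  unfold pvBoard
  rw [List.map_congr_left (g := fun (_ : Nat) => pvRow0 width.toNat)
    (fun i _ => if_neg (by omega))]
  simp [List.map_const']

theorem pvBoard_length (width height m : Int) : (pvBoard width height m).length = height.toNat := by
  simp [pvBoard]

-- the inner column loop only rewrites row n: factor it through that row
theorem pv_inner_factor (g : Int → Int) (l : List Int) (n : Nat) :
    ∀ A : List (List Int), n < A.length →
      l.foldl (fun A col => A.set n ((A.getD n []).set col.toNat (g col))) A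
        = A.set n (l.foldl (fun r col => r.set col.toNat (g col)) (A.getD n [])) := by
  induction l with
  | nil =>
    intro A hA
    rw [List.foldl_nil, List.foldl_nil, List.getD_eq_getElem _ _ hA, List.set_getElem_self hA]
  | cons c l ih =>
    intro A hA
    have hA' : n < (A.set n ((A.getD n []).set c.toNat (g c))).length := by simpa using hA
    rw [List.foldl_cons, List.foldl_cons, ih _ hA', List.set_set]
    congr 1
    congr 1
    rw [List.getD_eq_getElem _ _ hA']
    simp

theorem pvRow0_set_zero (w : Nat) (c : Nat) : (pvRow0 w).set c 0 = pvRow0 w := by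
  apply List.ext_getElem
  · simp [pvRow0]
  · intro i h1 h2
    simp only [pvRow0, List.getElem_set, List.getElem_replicate]
    split <;> rfl

theorem pvRow1_set_zero (w : Nat) (n c : Nat) (h : c ≠ n) :
    (pvRow1 w n).set c 0 = pvRow1 w n := by
  apply List.ext_getElem
  · simp [pvRow1]
  · intro i h1 h2
    simp only [pvRow1, List.getElem_set, List.getElem_replicate]
    split_ifs with h1 h2 <;> omega

theorem pv_fold_no_row (m : Int) (w : Nat) (l : List Int) (h : ∀ c ∈ l, m ≠ c) :
    l.foldl (fun r col => r.set col.toNat (if m = col then 1 else 0)) (pvRow0 w) = pvRow0 w := by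
  induction l with
  | nil => rfl
  | cons c l ih =>
    have hc : m ≠ c := h c (by simp)
    rw [List.foldl_cons, if_neg hc, pvRow0_set_zero]
    exact ih (fun c hc => h c (by simp [hc]))

theorem pv_fold_after_row (m : Int) (hm : 1 ≤ m) (w : Nat) (l : List Int) (h : ∀ c ∈ l, m < c) :
    l.foldl (fun r col => r.set col.toNat (if m = col then 1 else 0)) (pvRow1 w m.toNat)
      = pvRow1 w m.toNat := by
  induction l with
  | nil => rfl
  | cons c l ih =>
    have hc : m < c := h c (by simp)
    have hnat : c.toNat ≠ m.toNat := by omega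
    rw [List.foldl_cons, if_neg (by omega : ¬ m = c), pvRow1_set_zero _ _ _ hnat]
    exact ih (fun c hc => h c (by simp [hc]))

theorem pv_row_calc (width m : Int) (hm : 1 ≤ m) (w : Nat) :
    (PySem.List.pyRange 1 (width - 1) 1).foldl
        (fun r col => r.set col.toNat (if m = col then 1 else 0)) (pvRow0 w)
      = if m < width - 1 then pvRow1 w m.toNat else pvRow0 w := by
  by_cases hlt : m < width - 1
  · rw [if_pos hlt]
    rw [PySem.List.pyRange_one_append 1 m (width - 1) hm (le_of_lt hlt)]
    rw [PySem.List.pyRange_one_cons hlt]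
    rw [List.foldl_append]
    rw [pv_fold_no_row m w _ (by
      intro c hc
      rw [PySem.List.mem_pyRange_one] at hc
      omega)]
    rw [List.foldl_cons, if_pos rfl]
    exact pv_fold_after_row m hm w _ (by
      intro c hc
      rw [PySem.List.mem_pyRange_one] at hc
      omega)
  · rw [if_neg hlt]
    exact pv_fold_no_row m w _ (by
      intro c hc
      rw [PySem.List.mem_pyRange_one] at hc
      omega)

theorem pvBoard_getD (width height m : Int) (hm : 1 ≤ m) (hlt : m < height) :
    (pvBoard width height m).getD m.toNat [] = pvRow0 width.toNat := by
  have hn : m.toNat < (pvBoard width height m).length := by rw [pvBoard_length]; omega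
  rw [List.getD_eq_getElem _ _ hn]
  simp only [pvBoard, List.getElem_map, List.getElem_range]
  rw [if_neg (by omega)]

theorem pvBoard_set (width height m : Int) (hm : 1 ≤ m) (hlt : m < height) :
    (pvBoard width height m).set m.toNat
        (if m < width - 1 then pvRow1 width.toNat m.toNat else pvRow0 width.toNat)
      = pvBoard width height (m + 1) := by
  apply List.ext_getElem
  · simp [pvBoard]
  · intro i h1 h2
    simp only [pvBoard, List.length_map, List.length_range] at h2
    simp only [pvBoard, List.getElem_set, List.getElem_map, List.getElem_range]
    by_cases hi : m.toNat = i
    · rw [if_pos hi]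
      subst hi
      have hcast : ((m.toNat : Nat) : Int) = m := by omega
      by_cases hw : m < width - 1
      · rw [if_pos hw, if_pos (by rw [hcast]; omega)]
      · rw [if_neg hw, if_neg (by rw [hcast]; omega)]
    · rw [if_neg hi]
      have hne : ((i : Nat) : Int) ≠ m := by omega
      by_cases hcond : 1 ≤ (i : Int) ∧ (i : Int) < m ∧ (i : Int) < width - 1
      · rw [if_pos hcond, if_pos (by omega)]
      · rw [if_neg hcond, if_neg (by omega)]

-- one step of A's outer row loop
theorem pv_stepA (width height m : Int) (hm : 1 ≤ m) (hlt : m < height - 1) :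
    (PySem.List.pyRange 1 (width - 1) 1).foldl (fun A col =>
        PySem.List.pySetD A m
          (PySem.List.pySetD (PySem.List.pyGetD A m []) col (if m == col then 1 else 0)))
      (pvBoard width height m)
      = pvBoard width height (m + 1) := by
  have h0 : (0 : Int) ≤ m := by omega
  rw [PySem.List.foldl_congr_mem _ _
    (fun A col => A.set m.toNat ((A.getD m.toNat []).set col.toNat (if m = col then 1 else 0))) _
    (by
      intro A col hcol
      rw [PySem.List.mem_pyRange_one] at hcol
      rw [PySem.List.pySetD_of_nonneg _ _ h0, PySem.List.pyGetD_of_nonneg _ _ h0,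
        PySem.List.pySetD_of_nonneg _ _ (by omega : (0 : Int) ≤ col)]
      simp [beq_iff_eq])]
  rw [pv_inner_factor _ _ _ _ (by rw [pvBoard_length]; omega)]
  rw [pvBoard_getD width height m hm (by omega)]
  rw [pv_row_calc width m hm]
  exact pvBoard_set width height m hm (by omega)

-- A's whole outer loop computes pvBoard
theorem pv_loopA (width height : Int) (k : Nat) (hk : 1 + (k : Int) ≤ height - 1) :
    (PySem.List.pyRange 1 (1 + (k : Int)) 1).foldl (fun A row =>
        (PySem.List.pyRange 1 (width - 1) 1).foldl (fun A col =>
          PySem.List.pySetD A row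
            (PySem.List.pySetD (PySem.List.pyGetD A row []) col (if row == col then 1 else 0))) A)
      (pvBoard width height 1)
      = pvBoard width height (1 + (k : Int)) := by
  induction k with
  | zero => simp [PySem.List.pyRange_one_eq_nil]
  | succ k ih =>
    have h1 : (1 : Int) ≤ 1 + (k : Int) := by omega
    rw [show (1 : Int) + ((k + 1 : Nat) : Int) = (1 + (k : Int)) + 1 by push_cast; ring]
    rw [PySem.List.pyRange_one_succ_right h1, List.foldl_append]
    rw [ih (by push_cast at hk ⊢; omega)]
    rw [List.foldl_cons, List.foldl_nil]
    exact pv_stepA width height (1 + (k : Int)) h1 (by push_cast at hk; omega)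

-- one step of B's diagonal loop
theorem pv_stepB (width height m : Int) (hm : 1 ≤ m) (hlt : m < min width height - 1) :
    PySem.List.pySetD (pvBoard width height m) m
        (PySem.List.pySetD (PySem.List.pyGetD (pvBoard width height m) m []) m 1)
      = pvBoard width height (m + 1) := by
  have h0 : (0 : Int) ≤ m := by omega
  rw [PySem.List.pyGetD_of_nonneg _ _ h0, PySem.List.pySetD_of_nonneg _ _ h0,
    PySem.List.pySetD_of_nonneg _ _ h0]
  rw [pvBoard_getD width height m hm (by omega)]
  have hset := pvBoard_set width height m hm (by omega)
  rw [if_pos (by omega)] at hset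
  exact hset

theorem pv_loopB (width height : Int) (k : Nat) (hk : 1 + (k : Int) ≤ min width height - 1) :
    (PySem.List.pyRange 1 (1 + (k : Int)) 1).foldl (fun A i =>
        PySem.List.pySetD A i (PySem.List.pySetD (PySem.List.pyGetD A i []) i 1))
      (pvBoard width height 1)
      = pvBoard width height (1 + (k : Int)) := by
  induction k with
  | zero => simp [PySem.List.pyRange_one_eq_nil]
  | succ k ih =>
    have h1 : (1 : Int) ≤ 1 + (k : Int) := by omega
    rw [show (1 : Int) + ((k + 1 : Nat) : Int) = (1 + (k : Int)) + 1 by push_cast; ring]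
    rw [PySem.List.pyRange_one_succ_right h1, List.foldl_append]
    rw [ih (by push_cast at hk ⊢; omega)]
    rw [List.foldl_cons, List.foldl_nil]
    exact pv_stepB width height (1 + (k : Int)) h1 (by push_cast at hk; omega)

theorem diagonalize_eq (width height : Int) :
    diagonalize width height = pvBoard width height (height - 1) := by
  unfold diagonalize
  rw [createBoard_eq, ← pvBoard_one]
  by_cases h : height - 1 ≤ 1
  · rw [PySem.List.pyRange_one_eq_nil h, List.foldl_nil]
    unfold pvBoard
    apply List.map_congr_left
    intro i _
    rw [if_neg (by omega), if_neg (by omega)]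
  · have hk : height - 1 = 1 + ((height - 2).toNat : Int) := by omega
    rw [hk]
    exact pv_loopA width height _ (by omega)

theorem diagonalize_alt_eq (width height : Int) :
    diagonalize_alt width height = pvBoard width height (min width height - 1) := by
  unfold diagonalize_alt
  rw [show (List.range height.toNat).map (fun _ => List.replicate width.toNat (0 : Int))
      = pvBoard width height 1 from by
    unfold pvBoard
    exact (List.map_congr_left (fun i _ => by rw [if_neg (by omega)]; rfl)).symm]
  by_cases h : min width height - 1 ≤ 1
  · rw [PySem.List.pyRange_one_eq_nil h, List.foldl_nil]
    unfold pvBoard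
    apply List.map_congr_left
    intro i _
    rw [if_neg (by omega), if_neg (by omega)]
  · have hk : min width height - 1 = 1 + ((min width height - 2).toNat : Int) := by omega
    rw [hk]
    exact pv_loopB width height _ (by omega)

theorem pvBoard_final (width height : Int) :
    pvBoard width height (height - 1) = pvBoard width height (min width height - 1) := by
  unfold pvBoard
  apply List.map_congr_left
  intro i hi
  rw [List.mem_range] at hi
  by_cases hc : 1 ≤ (i : Int) ∧ (i : Int) < height - 1 ∧ (i : Int) < width - 1
  · rw [if_pos hc, if_pos (by omega)]
  · rw [if_neg hc, if_neg (by omega)]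

-- ===== VERDICT (by name: the statement is the Claim_ definition above) =====
theorem diagonalize_spec : Claim_equal_diagonalize := by
  intro width height _
  unfold Spec_diagonalize
  rw [diagonalize_eq, diagonalize_alt_eq, pvBoard_final]
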